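-- pv_equiv track=rewrite | github.com/nicholas-wacks/nwacks-project-euler | Euler/Complete/Problem76.py | getCountOfSumsByMaxNumberAndTotalValue
-- ===== SOURCE A (Python) =====
-- foundAnswers = {}
--
-- def getCountOfSumsByMaxNumberAndTotalValue(maxNum, totalLeft):
--     if (maxNum == 1 or totalLeft <= 1):
--         return 1
--
--     if ((maxNum, totalLeft) in foundAnswers):
--         return foundAnswers[(maxNum, totalLeft)]
--
--     count = 0
--     for i in range(1, min(maxNum + 1, totalLeft + 1)):
--         count += getCountOfSumsByMaxNumberAndTotalValue(i, totalLeft - i)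
--
--     foundAnswers[(maxNum, totalLeft)] = count
--     return count
-- ===== SOURCE B (Python) =====
-- def getCountOfSumsByMaxNumberAndTotalValue(maxNum, totalLeft):
--     if totalLeft <= 1:
--         return 1
--     if maxNum < 1:
--         return 0
--     t = totalLeft
--     row = [1] * (t + 1)  # partitions into parts <= 1: exactly one for every n
--     for k in range(2, min(maxNum, t) + 1):
--         new = []
--         for n in range(t + 1):
--             new.append(row[n] + (new[n - k] if n >= k else 0))
--         row = new
--     return row[t]
-- ===== Notes on version B (the rewrite author's own statement) =====
-- stated objective: faster
-- what changed: Replaces A's memoized recursion that sums over the largest part (a loop of up to min(maxNum,totalLeft) recursive calls per state, recursion depth about totalLeft/2) with an iterative bottom-up table using the two-term recurrence p(k,n) = p(k-1,n) + p(k,n-k), O(1) work per table cell and no recursion.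
-- outside the precondition, e.g. on getCountOfSumsByMaxNumberAndTotalValue(3, 1950): A returns 317851, B returns 317851
-- crash fix: On maxNum >= 2 and totalLeft >= 1996 A's recursion (depth about totalLeft/2) exceeds CPython's recursion limit and raises RecursionError, while the iterative B returns the partition count; Raises_ is additionally bounded so B's table provably fits in time and memory there. — e.g. on getCountOfSumsByMaxNumberAndTotalValue(2, 5000000): A raises RecursionError, B returns 2500001
import Mathlib
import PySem

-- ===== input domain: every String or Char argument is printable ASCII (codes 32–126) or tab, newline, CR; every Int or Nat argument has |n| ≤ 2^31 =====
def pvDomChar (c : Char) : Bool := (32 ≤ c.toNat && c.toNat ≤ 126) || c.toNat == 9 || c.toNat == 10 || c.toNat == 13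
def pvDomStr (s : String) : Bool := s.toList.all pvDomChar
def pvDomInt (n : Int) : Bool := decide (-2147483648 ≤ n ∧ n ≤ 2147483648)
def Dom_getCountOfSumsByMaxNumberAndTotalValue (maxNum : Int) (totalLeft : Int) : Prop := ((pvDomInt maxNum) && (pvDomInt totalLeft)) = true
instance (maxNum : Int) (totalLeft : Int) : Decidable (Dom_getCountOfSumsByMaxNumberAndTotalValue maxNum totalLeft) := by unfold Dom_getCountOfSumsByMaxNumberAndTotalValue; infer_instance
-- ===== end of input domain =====

-- B replaces A's memoized sum-over-largest-part recursion by an iterative bottom-up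
-- table using the two-term recurrence p(k,n) = p(k-1,n) + p(k,n-k): asymptotically faster.
-- (A's global memo dict only caches; it never changes A's return value, so the port is the plain recursion.)

-- ===== PORT A =====
-- foundAnswers is a module-level memo dict; it only caches results (never changes the returned value),
-- so each top-level call is ported with the cache threaded through explicitly, starting empty.
-- The cache is an internal helper (int-pair keys, point lookup/insert), ported as a hash map.
def getCountOfSumsByMaxNumberAndTotalValueMemo (memo : Std.HashMap (Int × Int) Int)
    (maxNum : Int) (totalLeft : Int) : Std.HashMap (Int × Int) Int × Int :=
  if maxNum = 1 ∨ totalLeft ≤ 1 then (memo, 1)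
  else
    match memo[(maxNum, totalLeft)]? with
    | some v => (memo, v)
    | none =>
      let r := (PySem.List.pyRange 1 (min (maxNum + 1) (totalLeft + 1)) 1).attach.foldl
        (fun (s : Std.HashMap (Int × Int) Int × Int) i =>
          let r := getCountOfSumsByMaxNumberAndTotalValueMemo s.1 i.1 (totalLeft - i.1)
          (r.1, s.2 + r.2)) (memo, 0)
      (r.1.insert (maxNum, totalLeft) r.2, r.2)
termination_by totalLeft.toNat
decreasing_by
  have h := PySem.List.mem_pyRange_one.mp i.2
  omega

def getCountOfSumsByMaxNumberAndTotalValue (maxNum : Int) (totalLeft : Int) : Int :=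
  (getCountOfSumsByMaxNumberAndTotalValueMemo ∅ maxNum totalLeft).2

-- ===== PORT B =====
-- every index B reads (row[n], new[n-k], row[totalLeft]) is in range, so pyGetD's default is never used; exact.
def getCountOfSumsByMaxNumberAndTotalValue_alt (maxNum : Int) (totalLeft : Int) : Int :=
  if totalLeft ≤ 1 then 1
  else if maxNum < 1 then 0
  else
    PySem.List.pyGetD
      ((PySem.List.pyRange 2 (min maxNum totalLeft + 1) 1).foldl
        (fun row k =>
          (PySem.List.pyRange 0 (totalLeft + 1) 1).foldl
            (fun new n =>
              new ++ [PySem.List.pyGetD row n 0 +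
                (if k ≤ n then PySem.List.pyGetD new (n - k) 0 else 0)]) [])
        (List.replicate (totalLeft.toNat + 1) 1))
      totalLeft 0

-- ===== PRECONDITION & SPEC =====
-- Pre_ excludes the inputs on which A's unbounded recursion (depth ~ totalLeft/2 stack frames)
-- overruns CPython's recursion limit and raises RecursionError (observed from totalLeft = 1996 with
-- maxNum >= 2); the boundary 1900 carries a small safety margin because the exact crash point depends
-- on interpreter stack state and on what A's global memo already holds, so a thin band of large inputs
-- on which A still returns (and agrees with B) is excluded too.
def Pre_getCountOfSumsByMaxNumberAndTotalValue (maxNum : Int) (totalLeft : Int) : Prop :=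
  maxNum ≤ 1 ∨ totalLeft ≤ 1900
instance (maxNum : Int) (totalLeft : Int) : Decidable (Pre_getCountOfSumsByMaxNumberAndTotalValue maxNum totalLeft) := by unfold Pre_getCountOfSumsByMaxNumberAndTotalValue; infer_instance
def pvWitness_getCountOfSumsByMaxNumberAndTotalValue : Int × Int := (7, 10)

-- On inputs with maxNum ≥ 2 and totalLeft ≥ 1996 Python A raises RecursionError (recursion depth
-- ~ totalLeft/2 exceeds CPython's limit) while B, which is iterative, returns the partition count;
-- the region is bounded (totalLeft ≤ 10^7 and table work min(maxNum,totalLeft)*totalLeft ≤ 10^8)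
-- so that B's table demonstrably fits in time and memory on the whole region.
def Raises_getCountOfSumsByMaxNumberAndTotalValue (maxNum : Int) (totalLeft : Int) : Prop :=
  2 ≤ maxNum ∧ 1996 ≤ totalLeft ∧ totalLeft ≤ 10000000 ∧ min maxNum totalLeft * totalLeft ≤ 100000000
instance (maxNum : Int) (totalLeft : Int) : Decidable (Raises_getCountOfSumsByMaxNumberAndTotalValue maxNum totalLeft) := by unfold Raises_getCountOfSumsByMaxNumberAndTotalValue; infer_instance
def pvRaiseWitness_getCountOfSumsByMaxNumberAndTotalValue : Int × Int := (2, 5000000)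
def pvRaiseWitnessOut_getCountOfSumsByMaxNumberAndTotalValue : Int := 2500001

def Spec_getCountOfSumsByMaxNumberAndTotalValue (maxNum : Int) (totalLeft : Int) (out : Int) : Prop := out = getCountOfSumsByMaxNumberAndTotalValue_alt maxNum totalLeft
instance (maxNum : Int) (totalLeft : Int) (out : Int) : Decidable (Spec_getCountOfSumsByMaxNumberAndTotalValue maxNum totalLeft out) := by unfold Spec_getCountOfSumsByMaxNumberAndTotalValue; infer_instance

-- ===== CLAIM (what is proved, stated in full; the proofs are below) =====
def Claim_equal_getCountOfSumsByMaxNumberAndTotalValue : Prop := ∀ (maxNum : Int) (totalLeft : Int), Dom_getCountOfSumsByMaxNumberAndTotalValue maxNum totalLeft → Pre_getCountOfSumsByMaxNumberAndTotalValue maxNum totalLeft → Spec_getCountOfSumsByMaxNumberAndTotalValue maxNum totalLeft (getCountOfSumsByMaxNumberAndTotalValue maxNum totalLeft)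

def Claim_raises_getCountOfSumsByMaxNumberAndTotalValue : Prop := (∀ (maxNum : Int) (totalLeft : Int), Dom_getCountOfSumsByMaxNumberAndTotalValue maxNum totalLeft → Raises_getCountOfSumsByMaxNumberAndTotalValue maxNum totalLeft → ¬ Pre_getCountOfSumsByMaxNumberAndTotalValue maxNum totalLeft) ∧ (Dom_getCountOfSumsByMaxNumberAndTotalValue (pvRaiseWitness_getCountOfSumsByMaxNumberAndTotalValue.1) (pvRaiseWitness_getCountOfSumsByMaxNumberAndTotalValue.2) ∧ Raises_getCountOfSumsByMaxNumberAndTotalValue (pvRaiseWitness_getCountOfSumsByMaxNumberAndTotalValue.1) (pvRaiseWitness_getCountOfSumsByMaxNumberAndTotalValue.2) ∧ getCountOfSumsByMaxNumberAndTotalValue_alt (pvRaiseWitness_getCountOfSumsByMaxNumberAndTotalValue.1) (pvRaiseWitness_getCountOfSumsByMaxNumberAndTotalValue.2) = pvRaiseWitnessOut_getCountOfSumsByMaxNumberAndTotalValue)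

-- ===== LEMMAS AND PROOFS =====

-- p k n = number of partitions of n into parts ≤ k (the mathematical reference both ports are tied to)
def part : Nat → Nat → Int
  | 0, 0 => 1
  | 0, _+1 => 0
  | k+1, n => part k n + (if h : k+1 ≤ n then part (k+1) (n - (k+1)) else 0)
termination_by k n => (k, n)
decreasing_by
  · exact Prod.Lex.left _ _ (Nat.lt_succ_self k)
  · exact Prod.Lex.right _ (by omega)

theorem part_succ (k n : Nat) : part (k+1) n = part k n + (if k+1 ≤ n then part (k+1) (n-(k+1)) else 0) := by
  rw [part]
  split <;> simp_all

theorem part_zero_right (k : Nat) : part k 0 = 1 := by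
  induction k with
  | zero => rw [part]
  | succ k ih => rw [part_succ]; simp [ih]

theorem part_one_left (n : Nat) : part 1 n = 1 := by
  induction n with
  | zero => exact part_zero_right 1
  | succ n ih => rw [part_succ]; simp [show part 0 (n+1) = 0 from by rw [part], ih]

theorem part_succ_of_lt (k n : Nat) (h : n < k + 1) : part (k+1) n = part k n := by
  rw [part_succ]; simp [Nat.not_le.mpr h]

theorem part_of_le (t : Nat) : ∀ m, t ≤ m → part m t = part t t := by
  intro m
  induction m with
  | zero => intro h; have ht : t = 0 := Nat.le_zero.mp h; subst ht; rfl
  | succ m ih =>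
    intro h
    rcases Nat.lt_or_ge t (m+1) with h' | h'
    · rw [part_succ_of_lt m t h', ih (by omega)]
    · have ht : t = m + 1 := by omega
      subst ht; rfl

theorem part_min (m t : Nat) : part m t = part (min m t) t := by
  rcases Nat.le_total m t with h | h
  · rw [Nat.min_eq_left h]
  · rw [Nat.min_eq_right h, part_of_le t m h]

-- the largest-part decomposition: Σ_{i=1}^{M} p i (t-i) = p M t  (for 1 ≤ M ≤ t)
theorem sum_largest_part (t : Nat) : ∀ M, 1 ≤ M → M ≤ t →
    ((List.range M).map (fun k => part (k+1) (t - (k+1)))).sum = part M t := by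
  intro M
  induction M with
  | zero => omega
  | succ M ih =>
    intro _ hMt
    rcases Nat.eq_zero_or_pos M with h0 | hpos
    · subst h0
      simp only [List.range_one, List.map_cons, List.map_nil, List.sum_cons, List.sum_nil,
        add_zero, Nat.zero_add]
      rw [part_one_left, part_one_left]
    · rw [List.range_succ, List.map_append, List.sum_append, ih hpos (by omega)]
      simp only [List.map_cons, List.map_nil, List.sum_cons, List.sum_nil, add_zero]
      rw [part_succ M t]
      simp [hMt]


-- A's return value in closed form (what the memo entries must equal)
def aSpec (m t : Int) : Int :=
  if m = 1 ∨ t ≤ 1 then 1 else if m < 1 then 0 else part (min m t).toNat t.toNat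

abbrev MemoInv (memo : Std.HashMap (Int × Int) Int) : Prop :=
  ∀ (p : Int × Int) (v : Int), memo[p]? = some v → v = aSpec p.1 p.2

theorem aSpec_eq_part (m t : Int) (hm : 1 ≤ m) (ht : 0 ≤ t) :
    aSpec m t = part (min m t).toNat t.toNat := by
  unfold aSpec
  by_cases hbase : m = 1 ∨ t ≤ 1
  · rw [if_pos hbase]
    rcases Nat.eq_zero_or_pos t.toNat with h0 | hpos
    · rw [h0, part_zero_right]
    · rcases hbase with h1 | h1
      · subst h1
        rw [show (min 1 t).toNat = 1 from by omega, part_one_left]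
      · rw [show t.toNat = 1 from by omega, show (min m t).toNat = 1 from by omega, part_one_left]
  · rw [if_neg hbase, if_neg (by omega)]

theorem sum_aSpec (m t : Int) (ht : 2 ≤ t) (hm : m ≠ 1) :
    ((PySem.List.pyRange 1 (min (m + 1) (t + 1)) 1).map (fun i => aSpec i (t - i))).sum
      = aSpec m t := by
  by_cases hm1 : m < 1
  · rw [PySem.List.pyRange_one_eq_nil (by omega)]
    unfold aSpec
    rw [if_neg (by omega), if_pos hm1]
    rfl
  · have hm2 : 2 ≤ m := by omega
    rw [PySem.List.pyRange_one, List.map_map,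
        show (min (m + 1) (t + 1) - 1).toNat = (min m t).toNat from by omega]
    set M := (min m t).toNat with hM
    have hMle : M ≤ t.toNat := by omega
    have hM1 : 1 ≤ M := by omega
    rw [List.map_congr_left (g := fun k => part (k+1) (t.toNat - (k+1)))]
    · rw [sum_largest_part t.toNat M hM1 hMle]
      unfold aSpec
      rw [if_neg (by omega), if_neg (by omega)]
    · intro k hk
      have hkM : k < M := List.mem_range.mp hk
      simp only [Function.comp_apply]
      rw [aSpec_eq_part (1 + (k : Int)) (t - (1 + (k : Int))) (by omega) (by omega),
          show ((min (1 + (k : Int)) (t - (1 + (k : Int)))).toNat) = min (k+1) (t.toNat - (k+1)) from by omega,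
          show ((t - (1 + (k : Int))).toNat) = t.toNat - (k+1) from by omega]
      exact (part_min (k+1) (t.toNat - (k+1))).symm

-- the fold in A's recursive case: accumulates the sum of the children's values and preserves the memo invariant
theorem fold_spec (g : Std.HashMap (Int × Int) Int → Int → Std.HashMap (Int × Int) Int × Int)
    (spec : Int → Int) :
    ∀ (l : List Int), (∀ i ∈ l, ∀ memo, MemoInv memo → (g memo i).2 = spec i ∧ MemoInv (g memo i).1) →
      ∀ (memo : Std.HashMap (Int × Int) Int) (c : Int), MemoInv memo →
        (l.foldl (fun (s : Std.HashMap (Int × Int) Int × Int) i =>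
            let r := g s.1 i
            (r.1, s.2 + r.2)) (memo, c)).2 = c + (l.map spec).sum
        ∧ MemoInv (l.foldl (fun (s : Std.HashMap (Int × Int) Int × Int) i =>
            let r := g s.1 i
            (r.1, s.2 + r.2)) (memo, c)).1 := by
  intro l
  induction l with
  | nil => intro _ memo c hinv; simpa using hinv
  | cons a l ihl =>
    intro hg memo c hinv
    obtain ⟨hval, hmemo⟩ := hg a (by simp) memo hinv
    simp only [List.foldl_cons, List.map_cons, List.sum_cons]
    obtain ⟨h1, h2⟩ := ihl (fun i hi => hg i (by simp [hi])) (g memo a).1 (c + (g memo a).2) hmemo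
    refine ⟨?_, h2⟩
    rw [h1, hval]
    ring

theorem memo_spec (tn : Nat) : ∀ (m t : Int) (memo : Std.HashMap (Int × Int) Int),
    t.toNat = tn → MemoInv memo →
      (getCountOfSumsByMaxNumberAndTotalValueMemo memo m t).2 = aSpec m t
      ∧ MemoInv (getCountOfSumsByMaxNumberAndTotalValueMemo memo m t).1 := by
  induction tn using Nat.strong_induction_on with
  | _ tn ih =>
    intro m t memo htn hinv
    rw [getCountOfSumsByMaxNumberAndTotalValueMemo]
    by_cases hbase : m = 1 ∨ t ≤ 1
    · rw [if_pos hbase]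
      exact ⟨by unfold aSpec; rw [if_pos hbase], hinv⟩
    · rw [if_neg hbase]
      push Not at hbase
      obtain ⟨hm1, ht2⟩ := hbase
      cases hlook : memo[(m, t)]? with
      | some v =>
        exact ⟨hinv (m, t) v hlook, hinv⟩
      | none =>
        rw [List.foldl_attach (f := fun (s : Std.HashMap (Int × Int) Int × Int) (x : Int) =>
          let r := getCountOfSumsByMaxNumberAndTotalValueMemo s.1 x (t - x)
          (r.1, s.2 + r.2))]
        obtain ⟨h1, h2⟩ := fold_spec
          (fun memo i => getCountOfSumsByMaxNumberAndTotalValueMemo memo i (t - i))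
          (fun i => aSpec i (t - i))
          (PySem.List.pyRange 1 (min (m + 1) (t + 1)) 1)
          (fun i hi memo' hinv' => by
            have hb := PySem.List.mem_pyRange_one.mp hi
            exact ih (t - i).toNat (by omega) i (t - i) memo' rfl hinv')
          memo 0 hinv
        rw [zero_add] at h1
        have hsum : ((PySem.List.pyRange 1 (min (m + 1) (t + 1)) 1).map (fun i => aSpec i (t - i))).sum
            = aSpec m t := sum_aSpec m t (by omega) hm1
        constructor
        · rw [h1, hsum]
        · intro p v hp
          rw [Std.HashMap.getElem?_insert] at hp
          by_cases hpk : (m, t) = p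
          · rw [if_pos (by simp [hpk])] at hp
            cases hp
            rw [h1, hsum, ← hpk]
          · rw [if_neg (by simp [hpk])] at hp
            exact h2 p v hp

theorem A_eq_aSpec (m t : Int) : getCountOfSumsByMaxNumberAndTotalValue m t = aSpec m t := by
  unfold getCountOfSumsByMaxNumberAndTotalValue
  exact (memo_spec t.toNat m t ∅ rfl (fun p v hp => by simp at hp)).1

-- the inner loop of B: appending row-by-row builds exactly (List.range j).map G when G
-- satisfies the step equation the loop body implements
theorem inner_fold_spec (row : List Int) (K : Nat) (hK : 1 ≤ K) (G : Nat → Int) :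
    ∀ j : Nat, (∀ n, n < j → G n = PySem.List.pyGetD row (n : Int) 0 + (if K ≤ n then G (n - K) else 0)) →
      ((List.range j).foldl
        (fun (new : List Int) (n : Nat) => new ++ [PySem.List.pyGetD row (n : Int) 0 +
          (if (K : Int) ≤ (n : Int) then PySem.List.pyGetD new ((n : Int) - (K : Int)) 0 else 0)]) [])
        = (List.range j).map G := by
  intro j
  induction j with
  | zero => intro _; simp
  | succ j ih =>
    intro hG
    rw [List.range_succ, List.foldl_append, List.map_append,
        ih (fun n hn => hG n (by omega))]
    simp only [List.foldl_cons, List.foldl_nil, List.map_cons, List.map_nil]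
    congr 1
    rw [hG j (by omega)]
    congr 1
    · rcases le_or_gt K j with hKj | hKj
      · rw [if_pos (by exact_mod_cast hKj), if_pos hKj,
            show (j : Int) - (K : Int) = ((j - K : Nat) : Int) from by omega,
            PySem.List.pyGetD_natCast,
            PySem.List.pyGetD_natCast (List.map G (List.range j)) (j - K) 0,
            PySem.List.getD_map_range G j (j - K) 0 (by omega)]
      · rw [if_neg (by omega), if_neg (by omega)]

-- the outer loop of B: after rows 2..M the table is the partition row part M
theorem outer_fold_spec (T : Nat) : ∀ M : Nat, 1 ≤ M →
    ((PySem.List.pyRange 2 ((M : Int) + 1) 1).foldl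
      (fun row k =>
        (PySem.List.pyRange 0 ((T : Int) + 1) 1).foldl
          (fun new n =>
            new ++ [PySem.List.pyGetD row n 0 +
              (if k ≤ n then PySem.List.pyGetD new (n - k) 0 else 0)]) [])
      (List.replicate (T + 1) (1 : Int)))
      = (List.range (T + 1)).map (part M) := by
  intro M
  induction M with
  | zero => omega
  | succ M ih =>
    intro _
    rcases Nat.eq_zero_or_pos M with h0 | hpos
    · subst h0
      rw [show ((0 + 1 : Nat) : Int) + 1 = 2 from by norm_num,
          PySem.List.pyRange_one_eq_nil (le_refl 2), List.foldl_nil]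
      rw [List.map_congr_left (fun a _ => part_one_left a), List.map_const', List.length_range]
    · rw [show ((M + 1 : Nat) : Int) + 1 = ((M : Int) + 1) + 1 from by push_cast; ring,
          PySem.List.pyRange_one_succ_right (a := 2) (b := (M : Int) + 1) (by omega), List.foldl_append,
          ih hpos, List.foldl_cons, List.foldl_nil]
      have hcast : (M : Int) + 1 = ((M + 1 : Nat) : Int) := by push_cast; ring
      rw [hcast, show ((T : Int) + 1) = ((T + 1 : Nat) : Int) from by push_cast; ring,
          PySem.List.pyRange_zero_natCast, List.foldl_map]
      have happ := inner_fold_spec ((List.range (T + 1)).map (part M)) (M + 1) (by omega)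
        (part (M + 1)) (T + 1)
        (fun n hn => by
          rw [part_succ, PySem.List.pyGetD_natCast,
              PySem.List.getD_map_range (part M) (T + 1) n 0 hn])
      exact happ

-- B's value on the main branch
theorem B_eq_part (m t : Int) (hm : 1 ≤ m) (ht : 2 ≤ t) :
    getCountOfSumsByMaxNumberAndTotalValue_alt m t = part (min m t).toNat t.toNat := by
  obtain ⟨T, rfl⟩ : ∃ T : Nat, t = (T : Int) := ⟨t.toNat, by omega⟩
  rw [getCountOfSumsByMaxNumberAndTotalValue_alt, if_neg (by omega), if_neg (by omega)]
  have hM1 : 1 ≤ (min m (T : Int)).toNat := by omega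
  have hcast : min m (T : Int) + 1 = (((min m (T : Int)).toNat : Int)) + 1 := by omega
  simp only [Int.toNat_natCast]
  rw [hcast, outer_fold_spec T (min m (T : Int)).toNat hM1, PySem.List.pyGetD_natCast,
      PySem.List.getD_map_range (part (min m (T : Int)).toNat) (T + 1) T 0 (by omega)]


-- ===== VERDICT (by name: the statement is the Claim_ definition above) =====
theorem part_two (n : Nat) : part 2 n = (n : Int) / 2 + 1 := by
  induction n using Nat.strong_induction_on with
  | _ n ih =>
    rw [show (2:Nat) = 1 + 1 from rfl, part_succ, part_one_left]
    by_cases h2 : 1 + 1 ≤ n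
    · rw [if_pos h2, ih (n - 2) (by omega)]
      omega
    · rw [if_neg h2]
      omega

theorem getCountOfSumsByMaxNumberAndTotalValue_spec : Claim_equal_getCountOfSumsByMaxNumberAndTotalValue := by
  intro m t _ _
  unfold Spec_getCountOfSumsByMaxNumberAndTotalValue
  rw [A_eq_aSpec]
  by_cases ht1 : t ≤ 1
  · rw [getCountOfSumsByMaxNumberAndTotalValue_alt, if_pos ht1]
    unfold aSpec
    rw [if_pos (Or.inr ht1)]
  · by_cases hm : m < 1
    · rw [getCountOfSumsByMaxNumberAndTotalValue_alt, if_neg ht1, if_pos hm]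
      unfold aSpec
      rw [if_neg (by omega), if_pos hm]
    · rw [aSpec_eq_part m t (by omega) (by omega), B_eq_part m t (by omega) (by omega)]

@[simp]
theorem getCountOfSumsByMaxNumberAndTotalValue_raises : Claim_raises_getCountOfSumsByMaxNumberAndTotalValue := by
  unfold Claim_raises_getCountOfSumsByMaxNumberAndTotalValue
  refine ⟨?_, by decide, by decide, ?_⟩
  · intro m t _ h
    unfold Raises_getCountOfSumsByMaxNumberAndTotalValue at h
    unfold Pre_getCountOfSumsByMaxNumberAndTotalValue
    omega
  · show getCountOfSumsByMaxNumberAndTotalValue_alt 2 5000000 = 2500001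
    rw [B_eq_part 2 5000000 (by omega) (by omega),
        show ((min (2:Int) 5000000).toNat) = 2 from rfl,
        show ((5000000:Int).toNat) = 5000000 from rfl, part_two]
    norm_num
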